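-- pv_equiv track=rewrite | github.com/wonwooo/DataStructure-Algorithm | BeakjoonOJ_Solved/1652_2.py | count
-- ===== SOURCE A (Python) =====
-- def count(row):
--     num = 0
--     cnt = 0
--     for e in row:
--         if e == '.':
--             cnt += 1
--         elif e == 'X':
--             if cnt >= 2:
--                 num += 1
--             cnt = 0
--     if cnt >= 2:
--         num += 1
--     return num
-- ===== SOURCE B (Python) =====
-- def count(row):
--     s = ''.join('.' if e == '.' else 'X' if e == 'X' else '-' for e in row)
--     return sum(seg.count('.') >= 2 for seg in s.split('X'))
-- ===== Notes on version B (the rewrite author's own statement) =====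
-- stated objective: idiomatic
-- what changed: B replaces A's stateful char-by-char counter/reset loop with a declarative pipeline: canonicalise each element, split on 'X', and count the segments containing at least two dots.
import Mathlib
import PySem

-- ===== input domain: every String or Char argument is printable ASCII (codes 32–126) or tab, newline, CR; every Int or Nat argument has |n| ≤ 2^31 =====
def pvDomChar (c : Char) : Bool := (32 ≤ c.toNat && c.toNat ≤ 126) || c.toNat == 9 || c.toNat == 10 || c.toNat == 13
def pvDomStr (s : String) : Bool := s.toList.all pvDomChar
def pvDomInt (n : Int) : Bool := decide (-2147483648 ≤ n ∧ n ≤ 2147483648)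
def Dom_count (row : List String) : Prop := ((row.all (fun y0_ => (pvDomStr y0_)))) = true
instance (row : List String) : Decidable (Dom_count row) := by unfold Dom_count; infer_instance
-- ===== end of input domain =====

-- B: canonicalise, split on 'X', count segments with ≥2 dots — idiomatic decomposition of A's stateful loop.
-- ===== PORT A =====
-- loop state (num, cnt) of A, recursed over the row
def countAux : List String → Int → Int → Int
  | [], num, cnt => if cnt ≥ 2 then num + 1 else num
  | e :: rest, num, cnt =>
      if e = "." then countAux rest num (cnt + 1)
      else if e = "X" then countAux rest (if cnt ≥ 2 then num + 1 else num) 0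
      else countAux rest num cnt

def count (row : List String) : Int := countAux row 0 0

-- ===== PORT B =====
-- Source B's canonicalising join: each element becomes one char
def tok (e : String) : Char := if e = "." then '.' else if e = "X" then 'X' else '-'

-- Source B's s.split('X'), ported by hand; returns (first segment, remaining segments)
def splitX : List Char → List Char × List (List Char)
  | [] => ([], [])
  | c :: rest =>
      let (s, ss) := splitX rest
      if c = 'X' then ([], s :: ss) else (c :: s, ss)

-- sum(seg.count('.') >= 2 for seg in segments)
def count_alt (row : List String) : Int :=
  let (s, ss) := splitX (row.map tok)
  (if 2 ≤ s.count '.' then 1 else 0) + Int.ofNat (ss.countP (fun t => 2 ≤ t.count '.'))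

-- ===== PRECONDITION & SPEC =====
def Spec_count (row : List String) (out : Int) : Prop := out = count_alt row
instance (row : List String) (out : Int) : Decidable (Spec_count row out) := by unfold Spec_count; infer_instance

-- ===== CLAIM (what is proved, stated in full; the proofs are below) =====
def Claim_equal_count : Prop := ∀ (row : List String), Dom_count row → Spec_count row (count row)

-- ===== LEMMAS AND PROOFS =====

-- A's loop in terms of B's split of the remaining (canonicalised) input
lemma countAux_splitX (row : List String) : ∀ (num cnt : Int),
    countAux row num cnt =
      num + (if 2 ≤ cnt + ((splitX (row.map tok)).1.count '.' : Int) then 1 else 0)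
          + Int.ofNat ((splitX (row.map tok)).2.countP (fun t => 2 ≤ t.count '.')) := by
  induction row with
  | nil => intro num cnt; simp [countAux, splitX]; split_ifs <;> omega
  | cons e rest ih =>
    intro num cnt
    by_cases h1 : e = "."
    · simp [countAux, h1, tok, splitX, ih]
      have : (cnt + 1) + ((splitX (rest.map tok)).1.count '.' : Int)
           = cnt + (((splitX (rest.map tok)).1.count '.' : Int) + 1) := by ring
      rw [this]
    · by_cases h2 : e = "X"
      · simp [countAux, h2, tok, splitX, ih, List.countP_cons]
        split_ifs <;> ring_nf <;> omega
      · simp [countAux, h1, h2, tok, splitX, ih]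

-- ===== VERDICT (by name: the statement is the Claim_ definition above) =====
theorem count_spec : Claim_equal_count := by
  intro row _
  unfold Spec_count count count_alt
  rw [countAux_splitX]
  simp
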